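-- pv_equiv track=rewrite | github.com/pablokrott/Programmeer-Opdracht | tekstanalyse_neger.py | count_specific_words
-- ===== SOURCE A (Python) =====
-- import string
--
-- def count_specific_words(text, specific_words):
--     text = text.translate(str.maketrans('', '', string.punctuation)).lower()
--
--     words = text.split()
--
--     word_count = {word: 0 for word in specific_words}
--
--     for word in words:
--         if word in word_count:
--             word_count[word] += 1
--
--     return word_count
-- ===== SOURCE B (Python) =====
-- import string
--
-- def count_specific_words(text, specific_words):
--     words = text.translate(str.maketrans('', '', string.punctuation)).lower().split()
--     freq = {}
--     for w in words:
--         freq[w] = freq.get(w, 0) + 1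
--     return {w: freq.get(w, 0) for w in specific_words}
-- ===== Notes on version B (the rewrite author's own statement) =====
-- stated objective: alternative
-- what changed: B builds a full frequency table of all words in one unguarded pass and then reads the targets off it in a comprehension, instead of seeding a target-keyed dict with zeros and incrementing it behind a membership test inside the word loop.
import Mathlib
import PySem

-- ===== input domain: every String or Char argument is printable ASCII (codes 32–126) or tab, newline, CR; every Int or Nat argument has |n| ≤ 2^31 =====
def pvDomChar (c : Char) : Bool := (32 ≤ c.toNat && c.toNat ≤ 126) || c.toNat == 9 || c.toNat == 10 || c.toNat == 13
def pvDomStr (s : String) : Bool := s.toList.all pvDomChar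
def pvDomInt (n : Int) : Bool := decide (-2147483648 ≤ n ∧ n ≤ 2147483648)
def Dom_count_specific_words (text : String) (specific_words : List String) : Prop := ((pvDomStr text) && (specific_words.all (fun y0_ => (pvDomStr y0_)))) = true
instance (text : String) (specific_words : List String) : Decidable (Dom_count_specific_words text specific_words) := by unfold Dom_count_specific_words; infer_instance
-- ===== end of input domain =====

-- B builds a full frequency table of all words in one unguarded pass and then reads the
-- targets off it, instead of seeding a target-keyed dict with zeros and incrementing it
-- behind a membership test inside the word loop (objective: alternative, same cost).

-- string.punctuation
def pvPunct : List Char := "!\"#$%&'()*+,-./:;<=>?@[\\]^_`{|}~".toList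

-- text.translate(str.maketrans('', '', string.punctuation)): removal of a fixed ASCII
-- character set is exact as a filter over the characters.
def pvStripPunct (text : String) : String := String.ofList (text.toList.filter (fun c => !(pvPunct.contains c)))

-- ===== PORT A =====
def count_specific_words (text : String) (specific_words : List String) : List (String × Int) :=
  let words := PySem.Str.split₀ (PySem.Str.lower (pvStripPunct text))
  let word_count : PySem.Dict String Int :=
    specific_words.foldl (fun d w => d.insert w 0) PySem.Dict.empty
  let word_count :=
    words.foldl (fun d w => if d.contains w then d.modify w 0 (· + 1) else d) word_count
  word_count.items

-- ===== PORT B =====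
def count_specific_words_alt (text : String) (specific_words : List String) : List (String × Int) :=
  let words := PySem.Str.split₀ (PySem.Str.lower (pvStripPunct text))
  let freq : PySem.Dict String Int :=
    words.foldl (fun d w => d.insert w (d.getD w 0 + 1)) PySem.Dict.empty
  (PySem.List.dedup specific_words).map (fun w => (w, freq.getD w 0))

-- ===== PRECONDITION & SPEC =====
def Spec_count_specific_words (text : String) (specific_words : List String) (out : List (String × Int)) : Prop := out = count_specific_words_alt text specific_words
instance (text : String) (specific_words : List String) (out : List (String × Int)) : Decidable (Spec_count_specific_words text specific_words out) := by unfold Spec_count_specific_words; infer_instance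

-- ===== CLAIM (what is proved, stated in full; the proofs are below) =====
def Claim_equal_count_specific_words : Prop := ∀ (text : String) (specific_words : List String), Dom_count_specific_words text specific_words → Spec_count_specific_words text specific_words (count_specific_words text specific_words)

-- ===== LEMMAS AND PROOFS =====

-- the zero-seeding loop stores only zeros
lemma getD_foldl_insert_zero (sw : List String) (d : PySem.Dict String Int) (v : String)
    (h : d.getD v 0 = 0) :
    (sw.foldl (fun d w => d.insert w 0) d).getD v 0 = 0 := by
  induction sw generalizing d with
  | nil => simpa using h
  | cons w ws ih =>
      simp only [List.foldl_cons]
      apply ih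
      by_cases hw : v = w
      · subst hw; simp [PySem.Dict.getD_insert_self]
      · rwa [PySem.Dict.getD_insert_of_ne _ _ _ hw]

-- A's guarded loop preserves the key set
lemma keys_gfold (words : List String) (d : PySem.Dict String Int) :
    (words.foldl (fun d w => if d.contains w then d.modify w 0 (· + 1) else d) d).keys = d.keys := by
  induction words generalizing d with
  | nil => rfl
  | cons w ws ih =>
      simp only [List.foldl_cons]
      by_cases hc : d.contains w = true
      · rw [if_pos hc, ih, PySem.Dict.keys_modify, PySem.Dict.keys_insert_of_contains _ _ hc]
      · rw [if_neg hc, ih]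

-- value of a key through A's guarded counting loop
lemma getD_gfold (words : List String) (d : PySem.Dict String Int) (v : String) :
    (words.foldl (fun d w => if d.contains w then d.modify w 0 (· + 1) else d) d).getD v 0 =
      d.getD v 0 + (if d.contains v then (words.count v : Int) else 0) := by
  induction words generalizing d with
  | nil => simp
  | cons w ws ih =>
      simp only [List.foldl_cons]
      by_cases hc : d.contains w = true
      · rw [if_pos hc, ih]
        have hcon : (d.modify w 0 (· + 1)).contains v = d.contains v := by
          rw [PySem.Dict.contains_modify]
          by_cases hv : v = w
          · subst hv; simp [hc]
          · simp [hv]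
        rw [hcon, PySem.Dict.getD_modify]
        by_cases hv : v = w
        · subst hv
          rw [if_pos rfl, if_pos hc, if_pos hc]
          simp
          ring
        · rw [if_neg hv]
          simp [Ne.symm hv]
      · rw [if_neg hc, ih]
        by_cases hv : v = w
        · subst hv
          rw [if_neg hc, if_neg hc]
        · simp [Ne.symm hv]

-- keys of the zero-seeded dict are the deduplicated targets
lemma keys_seed (sw : List String) :
    ((sw.foldl (fun d w => d.insert w 0) (PySem.Dict.empty : PySem.Dict String Int))).keys
      = PySem.List.dedup sw := by
  rw [PySem.Dict.keys_foldl_insert]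
  simp [PySem.Dict.keys_empty, PySem.List.dedup_eq_ofList]
  rfl

-- the heart of the equivalence, with the (shared) word list abstract
lemma core_eq (words sw : List String) :
    (words.foldl (fun d w => if d.contains w then d.modify w 0 (· + 1) else d)
        (sw.foldl (fun d w => d.insert w 0) (PySem.Dict.empty : PySem.Dict String Int))).items
      = (PySem.List.dedup sw).map (fun w =>
          (w, (words.foldl (fun d w => d.insert w (d.getD w 0 + 1))
                (PySem.Dict.empty : PySem.Dict String Int)).getD w 0)) := by
  set d0 := sw.foldl (fun d w => d.insert w 0) (PySem.Dict.empty : PySem.Dict String Int) with hd0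
  set dfin := words.foldl (fun d w => if d.contains w then d.modify w 0 (· + 1) else d) d0 with hdfin
  have hkeys : dfin.keys = PySem.List.dedup sw := by
    rw [hdfin, keys_gfold, hd0, keys_seed]
  have hnd : dfin.keys.Nodup := by rw [hkeys]; exact PySem.List.nodup_dedup sw
  rw [PySem.Dict.items_eq_map_keys dfin hnd 0, hkeys]
  apply List.map_congr_left
  intro w hw
  have hc : d0.contains w = true := by
    rw [PySem.Dict.contains_iff_mem_keys, hd0, keys_seed]; exact hw
  have h1 : dfin.getD w 0 = (words.count w : Int) := by
    rw [hdfin, getD_gfold, if_pos hc, hd0,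
      getD_foldl_insert_zero _ _ _ (PySem.Dict.getD_empty _ _)]
    ring
  have h2 : (words.foldl (fun d w => d.insert w (d.getD w 0 + 1)) PySem.Dict.empty).getD w 0
      = (words.count w : Int) := by
    rw [PySem.Dict.getD_foldl_insert_add_one, PySem.Dict.getD_empty, zero_add]
  rw [h1, h2]

-- ===== VERDICT (by name: the statement is the Claim_ definition above) =====
theorem count_specific_words_spec : Claim_equal_count_specific_words := by
  intro text sw _
  exact core_eq (PySem.Str.split₀ (PySem.Str.lower (pvStripPunct text))) sw
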